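-- pv_equiv track=rewrite | github.com/Opsimathy/IT5003 | Finals/IT5003 24S1/IT5003 24S1 Final Code.py | buddySystem_naive
-- ===== SOURCE A (Python) =====
-- from typing import List, Optional, Tuple
--
-- def buddySystem_naive(L: List[int]) -> int:
--     s = 0
--     for i in range(len(L)):
--         for j in range(i - 1, -1, -1):
--             if L[j] < L[i]:
--                 s += L[j]
--                 break
--     return s
-- ===== SOURCE B (Python) =====
-- def buddySystem_naive(L):
--     s = 0
--     stack = []
--     for x in L:
--         while stack and stack[-1] >= x:
--             stack.pop()
--         if stack:
--             s += stack[-1]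
--         stack.append(x)
--     return s
-- ===== Notes on version B (the rewrite author's own statement) =====
-- stated objective: faster
-- what changed: Replaced the quadratic backward scan per index with a single-pass monotonic stack that maintains the strictly increasing candidates for previous-smaller-element.
import Mathlib
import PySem

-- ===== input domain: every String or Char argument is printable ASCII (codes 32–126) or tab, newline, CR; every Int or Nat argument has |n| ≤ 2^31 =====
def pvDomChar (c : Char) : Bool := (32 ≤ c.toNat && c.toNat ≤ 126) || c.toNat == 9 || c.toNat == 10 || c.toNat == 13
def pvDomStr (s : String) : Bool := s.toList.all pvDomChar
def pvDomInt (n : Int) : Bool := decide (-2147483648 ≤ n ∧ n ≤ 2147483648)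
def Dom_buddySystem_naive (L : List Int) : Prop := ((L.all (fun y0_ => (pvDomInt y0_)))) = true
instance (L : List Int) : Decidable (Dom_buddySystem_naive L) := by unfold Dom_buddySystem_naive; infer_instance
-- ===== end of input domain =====

-- B replaces A's quadratic per-index backward scan with a one-pass monotonic stack (objective: faster, asymptotic).

-- ===== PORT A =====
-- inner loop 'for j in range(i-1, -1, -1): if L[j] < L[i]: s += L[j]; break',
-- as a downward structural recursion on j (argument is i, so j runs i-1 … 0)
def pvInnerA (L : List Int) (xi : Int) : Nat → Int
  | 0 => 0
  | j + 1 =>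
    let v := (PySem.List.pyGet? L (j : Int)).getD 0   -- L[j]; index always in range here
    if v < xi then v else pvInnerA L xi j

def buddySystem_naive (L : List Int) : Int :=
  (List.range L.length).foldl
    (fun s i => s + pvInnerA L ((PySem.List.pyGet? L (Int.ofNat i)).getD 0) i) 0

-- ===== PORT B =====
-- 'while stack and stack[-1] >= x: stack.pop()' (stack head = Python's stack[-1])
def pvPopGE (x : Int) : List Int → List Int
  | [] => []
  | t :: rest => if x ≤ t then pvPopGE x rest else t :: rest

def buddySystem_naive_alt (L : List Int) : Int :=
  (L.foldl
    (fun (p : Int × List Int) x =>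
      match pvPopGE x p.2 with
      | [] => (p.1, [x])
      | t :: rest => (p.1 + t, x :: t :: rest)) ((0 : Int), ([] : List Int))).1

-- ===== PRECONDITION & SPEC =====
def Spec_buddySystem_naive (L : List Int) (out : Int) : Prop := out = buddySystem_naive_alt L
instance (L : List Int) (out : Int) : Decidable (Spec_buddySystem_naive L out) := by unfold Spec_buddySystem_naive; infer_instance

-- ===== CLAIM (what is proved, stated in full; the proofs are below) =====
def Claim_equal_buddySystem_naive : Prop := ∀ (L : List Int), Dom_buddySystem_naive L → Spec_buddySystem_naive L (buddySystem_naive L)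

-- ===== LEMMAS AND PROOFS =====

-- middle-level specification: contribution of x is the first element of the reversed prefix rp smaller than x
def pvSpecSum (rp : List Int) : List Int → Int
  | [] => 0
  | x :: rest => ((rp.find? (fun v => decide (v < x))).getD 0) + pvSpecSum (x :: rp) rest

-- ---- A side ----

theorem pvInnerA_eq_find (L : List Int) (xi : Int) :
    ∀ i, i ≤ L.length →
      pvInnerA L xi i = (((L.take i).reverse).find? (fun v => decide (v < xi))).getD 0 := by
  intro i
  induction i with
  | zero => intro _; simp [pvInnerA]
  | succ j ih =>
    intro h
    have hj : j < L.length := by omega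
    have hget : (PySem.List.pyGet? L (j : Int)).getD 0 = L[j] := by
      simp [List.getElem?_eq_getElem hj]
    have htake : (L.take (j + 1)).reverse = L[j] :: (L.take j).reverse := by
      rw [List.take_add_one]
      simp [hj]
    rw [pvInnerA, htake]
    simp only [hget, List.find?]
    by_cases hc : L[j] < xi
    · simp [hc]
    · simp [hc, ih (by omega)]

theorem pvA_eq_spec (L : List Int) : buddySystem_naive L = pvSpecSum [] L := by
  -- generalize: sum over range of contributions equals pvSpecSum
  suffices h : ∀ (M : List Int) (s : Int),
      (List.range M.length).foldl
        (fun s i => s + pvInnerA M ((PySem.List.pyGet? M (Int.ofNat i)).getD 0) i) s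
      = s + pvSpecSum [] M by
    have := h L 0
    simpa [buddySystem_naive] using this
  intro M
  induction M using List.reverseRecOn with
  | nil => intro s; simp [pvSpecSum]
  | append_singleton M x ih =>
    intro s
    have hlen : (M ++ [x]).length = M.length + 1 := by simp
    rw [hlen, List.range_succ, List.foldl_append]
    -- contributions for i < M.length agree between M and M ++ [x]
    have hsame : (List.range M.length).foldl
        (fun s i => s + pvInnerA (M ++ [x]) ((PySem.List.pyGet? (M ++ [x]) (Int.ofNat i)).getD 0) i) s
        = (List.range M.length).foldl
        (fun s i => s + pvInnerA M ((PySem.List.pyGet? M (Int.ofNat i)).getD 0) i) s := by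
      apply PySem.List.foldl_congr_mem
      intro a b hb
      have hbl : b < M.length := List.mem_range.mp hb
      have h1 : pvInnerA (M ++ [x]) ((PySem.List.pyGet? (M ++ [x]) (Int.ofNat b)).getD 0) b
              = pvInnerA M ((PySem.List.pyGet? M (Int.ofNat b)).getD 0) b := by
        have hget : PySem.List.pyGet? (M ++ [x]) (Int.ofNat b) = PySem.List.pyGet? M (Int.ofNat b) := by
          simp only [Int.ofNat_eq_natCast, PySem.List.pyGet?_natCast]
          exact List.getElem?_append_left hbl
        rw [hget]
        rw [pvInnerA_eq_find M _ b (le_of_lt hbl),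
            pvInnerA_eq_find (M ++ [x]) _ b (by simp; omega)]
        rw [List.take_append_of_le_length (le_of_lt hbl)]
      rw [h1]
    rw [hsame, ih s]
    -- final contribution
    have hgetx : (PySem.List.pyGet? (M ++ [x]) (Int.ofNat M.length)).getD 0 = x := by
      simp
    have hinner : pvInnerA (M ++ [x]) x M.length
        = ((M.reverse).find? (fun v => decide (v < x))).getD 0 := by
      rw [pvInnerA_eq_find (M ++ [x]) x M.length (by simp)]
      rw [List.take_append_of_le_length le_rfl]
      simp
    -- pvSpecSum over M ++ [x]
    have hspec : ∀ (M : List Int) (rp : List Int),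
        pvSpecSum rp (M ++ [x]) = pvSpecSum rp M
          + (((M.reverse ++ rp).find? (fun v => decide (v < x))).getD 0) := by
      intro M
      induction M with
      | nil => intro rp; simp [pvSpecSum]
      | cons a M ihm =>
        intro rp
        simp only [List.cons_append, pvSpecSum, ihm (a :: rp)]
        ring_nf
        simp [List.append_assoc]
    rw [List.foldl_cons, List.foldl_nil, hgetx, hinner, hspec M []]
    simp
    ring

-- ---- B side ----

-- invariant: the stack answers every "first element < y" query exactly as the reversed prefix does
def pvInv (st rp : List Int) : Prop :=
  ∀ y : Int, st.find? (fun v => decide (v < y)) = rp.find? (fun v => decide (v < y))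

theorem pvPopGE_find (x y : Int) (hyx : y ≤ x) :
    ∀ st : List Int, (pvPopGE x st).find? (fun v => decide (v < y))
      = st.find? (fun v => decide (v < y)) := by
  intro st
  induction st with
  | nil => rfl
  | cons t rest ih =>
    by_cases h : x ≤ t
    · have : ¬ t < y := by omega
      simp [pvPopGE, h, List.find?, this, ih]
    · simp [pvPopGE, h]

theorem pvPopGE_head_lt (x t : Int) (r : List Int) : ∀ st : List Int,
    pvPopGE x st = t :: r → t < x := by
  intro st
  induction st with
  | nil => intro h; simp [pvPopGE] at h
  | cons a rest ih =>
    intro h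
    by_cases ha : x ≤ a
    · exact ih (by simpa [pvPopGE, ha] using h)
    · simp [pvPopGE, ha] at h
      omega

theorem pvB_loop (rest : List Int) : ∀ (s : Int) (st rp : List Int), pvInv st rp →
    (rest.foldl
      (fun (p : Int × List Int) x =>
        match pvPopGE x p.2 with
        | [] => (p.1, [x])
        | t :: r => (p.1 + t, x :: t :: r)) (s, st)).1
    = s + pvSpecSum rp rest := by
  induction rest with
  | nil => intro s st rp _; simp [pvSpecSum]
  | cons x rest ih =>
    intro s st rp hinv
    -- contribution of x
    have hfind : (pvPopGE x st).find? (fun v => decide (v < x))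
        = rp.find? (fun v => decide (v < x)) := by
      rw [pvPopGE_find x x le_rfl, hinv]
    have hinv' : ∀ r, pvPopGE x st = r → pvInv (x :: r) (x :: rp) := by
      intro r hr y
      by_cases hy : x < y
      · simp [List.find?, hy]
      · have hyx : y ≤ x := by omega
        have hd : decide (x < y) = false := by simp; omega
        simp only [List.find?, hd]
        rw [← hr, pvPopGE_find x y hyx, hinv]
    rw [List.foldl_cons]
    cases hpop : pvPopGE x st with
    | nil =>
      have hrp : rp.find? (fun v => decide (v < x)) = none := by
        rw [← hfind, hpop]; rfl
      simp only []
      rw [ih s [x] (x :: rp) (by simpa using hinv' [] hpop)]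
      simp [pvSpecSum, hrp]
    | cons t r =>
      have htx : t < x := pvPopGE_head_lt x t r st hpop
      have hrp : rp.find? (fun v => decide (v < x)) = some t := by
        rw [← hfind, hpop]
        simp [List.find?, htx]
      simp only []
      rw [ih (s + t) (x :: t :: r) (x :: rp) (hinv' (t :: r) hpop)]
      simp [pvSpecSum, hrp]
      ring

theorem pvB_eq_spec (L : List Int) : buddySystem_naive_alt L = pvSpecSum [] L := by
  have := pvB_loop L 0 [] [] (fun y => rfl)
  simpa [buddySystem_naive_alt] using this

-- ===== VERDICT (by name: the statement is the Claim_ definition above) =====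
theorem buddySystem_naive_spec : Claim_equal_buddySystem_naive := by
  intro L _
  unfold Spec_buddySystem_naive
  rw [pvA_eq_spec, pvB_eq_spec]
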